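-- pv_equiv track=rewrite | github.com/ASSERT-KTH/Mokav | experiments/pynguin/c4b/return-lst/generated_tests/src_519/9/src_519.py | func
-- ===== SOURCE A (Python) =====
-- def func(*args):
-- 	ret_values = []
--
-- 	import math
-- 	nStr = args[0]
-- 	n = int(nStr)
-- 	nameList = ['Sheldon', 'Leonard', 'Penny', 'Rajesh', 'Howard']
-- 	i = 1
-- 	while (n > (5 * i)):
-- 	    n = (n - (5 * i))
-- 	    i = (i * 2)
-- 	j = 0
-- 	while (n > i):
-- 	    n = (n - i)
-- 	    j = (j + 1)
-- 	ret_values.append(nameList[j])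
--
-- 	return ret_values
-- ===== SOURCE B (Python) =====
-- def func(*args):
--     n = int(args[0])
--     names = ['Sheldon', 'Leonard', 'Penny', 'Rajesh', 'Howard']
--     count = 1
--     while True:
--         for name in names:
--             if n <= count:
--                 return [name]
--             n -= count
--         count *= 2
-- ===== Notes on version B (the rewrite author's own statement) =====
-- stated objective: simpler
-- what changed: B interleaves A's two separate while-loops (round-doubling, then per-name index counting) into one sweep over the five names that keeps only n and count, returning as soon as n fits in the current chunk.
import Mathlib
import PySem

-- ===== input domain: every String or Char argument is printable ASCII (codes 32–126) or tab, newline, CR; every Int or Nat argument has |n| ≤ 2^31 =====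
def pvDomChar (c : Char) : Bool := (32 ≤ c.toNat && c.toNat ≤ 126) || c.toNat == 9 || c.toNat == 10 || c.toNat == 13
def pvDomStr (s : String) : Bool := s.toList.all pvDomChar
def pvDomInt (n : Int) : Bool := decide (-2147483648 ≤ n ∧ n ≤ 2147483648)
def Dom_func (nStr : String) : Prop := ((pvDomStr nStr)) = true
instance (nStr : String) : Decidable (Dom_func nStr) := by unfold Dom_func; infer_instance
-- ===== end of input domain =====

-- B merges A's two separate while-loops into one sweep over the five names keeping only n and count (simpler decomposition, same result wherever A returns).

-- ===== PORT A =====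
-- first while loop: while n > 5*i: n -= 5*i; i *= 2   (the '1 ≤ i' conjunct is a totality
-- guard only: func always calls it with i = 1 and i only doubles)
def aLoop1 (n i : Int) : Int × Int :=
  if h : 1 ≤ i ∧ 5 * i < n then aLoop1 (n - 5 * i) (i * 2) else (n, i)
termination_by n.toNat
decreasing_by omega

-- second while loop: while n > i: n -= i; j += 1   (same totality guard; j counts iterations)
def aLoop2 (n i : Int) (j : Nat) : Nat :=
  if h : 1 ≤ i ∧ i < n then aLoop2 (n - i) i (j + 1) else j
termination_by n.toNat
decreasing_by omega

def func (nStr : String) : List String :=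
  match PySem.Int.ofStr? nStr with
  | none => []   -- int(nStr) raises ValueError: excluded by Pre_func
  | some n =>
    let nameList := ["Sheldon", "Leonard", "Penny", "Rajesh", "Howard"]
    let p := aLoop1 n 1
    let j := aLoop2 p.1 p.2 0
    (PySem.List.pyGet? nameList (j : Int)).toList   -- ret_values = [nameList[j]] (index always in range)

-- ===== PORT B =====
-- the inner 'for name in names': return the first name with n ≤ count, else subtract count each time
def bInner (n count : Int) : List String → Option String × Int
  | [] => (none, n)
  | name :: rest => if n ≤ count then (some name, n) else bInner (n - count) count rest

-- if the sweep falls through, it subtracted count once per name and every check failed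
theorem bInner_none {l : List String} {n c n' : Int}
    (h : bInner n c l = (none, n')) :
    n' = n - l.length * c ∧ (0 < l.length → (l.length : Int) * c < n) := by
  induction l generalizing n with
  | nil => simp [bInner] at h; simp [h]
  | cons x xs ih =>
    simp only [bInner] at h
    split at h
    · simp at h
    · rename_i hnc
      obtain ⟨h1, h2⟩ := ih h
      have hexp : ((xs.length : Int) + 1) * c = (xs.length : Int) * c + c := by ring
      refine ⟨by simp only [List.length_cons]; push_cast; rw [hexp]; linarith, ?_⟩
      intro _
      simp only [List.length_cons]
      push_cast
      rw [hexp]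
      rcases Nat.eq_zero_or_pos xs.length with h0 | hpos
      · simp [h0] at h1 ⊢; omega
      · have := h2 hpos; linarith

-- the 'while True' loop: sweep the five names, then double count ('1 ≤ count' is a totality guard)
def bLoop (n count : Int) : List String :=
  if _hc : 1 ≤ count then
    match hm : bInner n count ["Sheldon", "Leonard", "Penny", "Rajesh", "Howard"] with
    | (some name, _) => [name]
    | (none, n') => bLoop n' (count * 2)
  else []
termination_by n.toNat
decreasing_by
  obtain ⟨h1, h2⟩ := bInner_none hm
  simp at h1 h2
  omega

def func_alt (nStr : String) : List String :=
  match PySem.Int.ofStr? nStr with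
  | none => []
  | some n => bLoop n 1

-- ===== PRECONDITION & SPEC =====
-- Pre_ excludes exactly the strings on which int(nStr) raises ValueError, where A returns nothing
def Pre_func (nStr : String) : Prop := (PySem.Int.ofStr? nStr).isSome = true
instance (nStr : String) : Decidable (Pre_func nStr) := by unfold Pre_func; infer_instance
def pvWitness_func : String := "7"

def Spec_func (nStr : String) (out : List String) : Prop := out = func_alt nStr
instance (nStr : String) (out : List String) : Decidable (Spec_func nStr out) := by unfold Spec_func; infer_instance

-- ===== CLAIM (what is proved, stated in full; the proofs are below) =====
def Claim_equal_func : Prop := ∀ (nStr : String), Dom_func nStr → Pre_func nStr → Spec_func nStr (func nStr)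

-- ===== LEMMAS AND PROOFS =====

-- when n > 5*count, the sweep returns no name and leaves n - 5*count
theorem bInner_gt {n i : Int} (hi : 1 ≤ i) (hgt : 5 * i < n) :
    bInner n i ["Sheldon", "Leonard", "Penny", "Rajesh", "Howard"] = (none, n - 5 * i) := by
  simp only [bInner]
  rw [if_neg (by omega), if_neg (by omega), if_neg (by omega), if_neg (by omega),
    if_neg (by omega)]
  congr 1
  ring

-- when n ≤ 5*count, the sweep returns names[j] with j minimal such that n ≤ (j+1)*count
theorem bLoop_le {n i : Int} (hi : 1 ≤ i) (hle : n ≤ 5 * i) :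
    bLoop n i =
      (PySem.List.pyGet? ["Sheldon", "Leonard", "Penny", "Rajesh", "Howard"]
        ((aLoop2 n i 0 : Nat) : Int)).toList := by
  rw [bLoop, dif_pos hi]
  by_cases h1 : n ≤ 1 * i
  · have hj : aLoop2 n i 0 = 0 := by rw [aLoop2, dif_neg (by omega)]
    have hb : bInner n i ["Sheldon", "Leonard", "Penny", "Rajesh", "Howard"] = (some "Sheldon", n - 0 * i) := by
      simp only [bInner]; rw [if_pos (by omega)]; congr 1; ring
    rw [hj]
    split <;> rename_i heq <;> rw [hb] at heq
    · obtain ⟨hn, -⟩ := Prod.mk.injEq .. ▸ heq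
      simp only [Option.some.injEq] at hn
      subst hn; decide
    · simp at heq
  by_cases h2 : n ≤ 2 * i
  · have hj : aLoop2 n i 0 = 1 := by rw [aLoop2, dif_pos (by omega), aLoop2, dif_neg (by omega)]
    have hb : bInner n i ["Sheldon", "Leonard", "Penny", "Rajesh", "Howard"] = (some "Leonard", n - 1 * i) := by
      simp only [bInner]; rw [if_neg (by omega), if_pos (by omega)]; congr 1; ring
    rw [hj]
    split <;> rename_i heq <;> rw [hb] at heq
    · obtain ⟨hn, -⟩ := Prod.mk.injEq .. ▸ heq
      simp only [Option.some.injEq] at hn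
      subst hn; decide
    · simp at heq
  by_cases h3 : n ≤ 3 * i
  · have hj : aLoop2 n i 0 = 2 := by rw [aLoop2, dif_pos (by omega), aLoop2, dif_pos (by omega), aLoop2, dif_neg (by omega)]
    have hb : bInner n i ["Sheldon", "Leonard", "Penny", "Rajesh", "Howard"] = (some "Penny", n - 2 * i) := by
      simp only [bInner]; rw [if_neg (by omega), if_neg (by omega), if_pos (by omega)]; congr 1; ring
    rw [hj]
    split <;> rename_i heq <;> rw [hb] at heq
    · obtain ⟨hn, -⟩ := Prod.mk.injEq .. ▸ heq
      simp only [Option.some.injEq] at hn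
      subst hn; decide
    · simp at heq
  by_cases h4 : n ≤ 4 * i
  · have hj : aLoop2 n i 0 = 3 := by rw [aLoop2, dif_pos (by omega), aLoop2, dif_pos (by omega), aLoop2, dif_pos (by omega), aLoop2, dif_neg (by omega)]
    have hb : bInner n i ["Sheldon", "Leonard", "Penny", "Rajesh", "Howard"] = (some "Rajesh", n - 3 * i) := by
      simp only [bInner]; rw [if_neg (by omega), if_neg (by omega), if_neg (by omega), if_pos (by omega)]; congr 1; ring
    rw [hj]
    split <;> rename_i heq <;> rw [hb] at heq
    · obtain ⟨hn, -⟩ := Prod.mk.injEq .. ▸ heq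
      simp only [Option.some.injEq] at hn
      subst hn; decide
    · simp at heq
  · have hj : aLoop2 n i 0 = 4 := by rw [aLoop2, dif_pos (by omega), aLoop2, dif_pos (by omega), aLoop2, dif_pos (by omega), aLoop2, dif_pos (by omega), aLoop2, dif_neg (by omega)]
    have hb : bInner n i ["Sheldon", "Leonard", "Penny", "Rajesh", "Howard"] = (some "Howard", n - 4 * i) := by
      simp only [bInner]; rw [if_neg (by omega), if_neg (by omega), if_neg (by omega), if_neg (by omega), if_pos (by omega)]; congr 1; ring
    rw [hj]
    split <;> rename_i heq <;> rw [hb] at heq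
    · obtain ⟨hn, -⟩ := Prod.mk.injEq .. ▸ heq
      simp only [Option.some.injEq] at hn
      subst hn; decide
    · simp at heq

theorem main_lemma : ∀ (n i : Int), 1 ≤ i →
    bLoop n i =
      (PySem.List.pyGet? ["Sheldon", "Leonard", "Penny", "Rajesh", "Howard"]
        ((aLoop2 (aLoop1 n i).1 (aLoop1 n i).2 0 : Nat) : Int)).toList := by
  intro n i
  induction n, i using aLoop1.induct with
  | case1 n i h ih =>
    intro _
    rw [aLoop1, dif_pos h]
    rw [bLoop, dif_pos h.1]
    split <;> rename_i heq
    · rw [bInner_gt h.1 h.2] at heq; simp at heq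
    · rw [bInner_gt h.1 h.2] at heq
      obtain ⟨-, h2⟩ := Prod.mk.injEq .. ▸ heq
      rw [← h2] at *
      exact ih (by omega)
  | case2 n i h =>
    intro hi
    rw [aLoop1, dif_neg h]
    exact bLoop_le hi (by omega)

theorem func_spec : Claim_equal_func := by
  intro nStr _ hpre
  unfold Spec_func func func_alt
  unfold Pre_func at hpre
  cases h : PySem.Int.ofStr? nStr with
  | none => simp [h] at hpre
  | some n => simpa using (main_lemma n 1 (by norm_num)).symm
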